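-- pv_equiv track=rewrite | github.com/byeol-hub/programmers | 프로그래머스/2/42586. 기능개발/기능개발.py | solution
-- ===== SOURCE A (Python) =====
-- def solution(progresses, speeds):
--     day = []
--
--     for i in range(len(progresses)):
--         if (100 - progresses[i]) % speeds[i] == 0:
--             day.append((100 - progresses[i]) // speeds[i])
--         else:
--             day.append(((100 - progresses[i]) // speeds[i])+1)
--
--     answer = [1]
--     value = day[0]
--
--     for i in day[1:]:
--         if value >= i:
--             answer[-1] += 1
--         else:
--             value = i
--             answer.append(1)
--
--     return answer
-- ===== SOURCE B (Python) =====
-- def solution(progresses, speeds):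
--     day = [(100 - p) // s + (1 if (100 - p) % s else 0) for p, s in zip(progresses, speeds)]
--     n = len(day)
--     boundaries = [i for i in range(n) if all(day[j] < day[i] for j in range(i))]
--     return [b - a for a, b in zip(boundaries, boundaries[1:] + [n])]
-- ===== Notes on version B (the rewrite author's own statement) =====
-- stated objective: alternative
-- what changed: A makes one pass with a mutable running maximum and in-place increment of answer[-1]; B instead finds the group-boundary indices directly (a day starts a group iff it is strictly greater than every earlier day, checked by a nested scan) and returns the differences of consecutive boundary indices.
import Mathlib
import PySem

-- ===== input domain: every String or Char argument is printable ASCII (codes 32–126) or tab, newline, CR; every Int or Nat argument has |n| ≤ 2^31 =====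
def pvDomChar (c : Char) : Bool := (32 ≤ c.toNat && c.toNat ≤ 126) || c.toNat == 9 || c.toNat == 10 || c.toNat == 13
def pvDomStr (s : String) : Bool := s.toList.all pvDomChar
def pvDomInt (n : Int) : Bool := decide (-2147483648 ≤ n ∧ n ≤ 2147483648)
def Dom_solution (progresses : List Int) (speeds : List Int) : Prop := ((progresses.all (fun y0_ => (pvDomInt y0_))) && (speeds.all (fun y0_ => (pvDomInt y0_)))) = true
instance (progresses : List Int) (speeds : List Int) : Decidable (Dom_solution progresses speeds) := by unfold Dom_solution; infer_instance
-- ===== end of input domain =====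

-- B replaces A's single pass (mutable running maximum, in-place increment of answer[-1]) by a
-- two-stage index computation: group-boundary indices found by a nested all-previous-smaller scan,
-- then differences of consecutive boundaries; alternative decomposition, not faster (O(n^2) vs O(n)).

-- ===== PORT A =====
-- the day-building loop: for i in range(len(progresses)): … day.append(…)
def solutionDayA (progresses : List Int) (speeds : List Int) : List Int :=
  (PySem.List.pyRange 0 (progresses.length : Int) 1).foldl (fun acc i =>
    if PySem.Int.mod (100 - PySem.List.pyGetD progresses i 0) (PySem.List.pyGetD speeds i 0) = 0 then
      acc ++ [PySem.Int.floordiv (100 - PySem.List.pyGetD progresses i 0) (PySem.List.pyGetD speeds i 0)]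
    else
      acc ++ [PySem.Int.floordiv (100 - PySem.List.pyGetD progresses i 0) (PySem.List.pyGetD speeds i 0) + 1]) []

def solution (progresses : List Int) (speeds : List Int) : List Int :=
  match solutionDayA progresses speeds with
  | [] => []    -- unreachable under Pre_: Python raises IndexError at day[0]
  | v0 :: rest =>
    -- answer = [1]; value = day[0]; for i in day[1:]: …
    (rest.foldl (fun st i =>
        if st.2 ≥ i then (st.1.dropLast ++ [st.1.getLast! + 1], st.2)
        else (st.1 ++ [1], i)) (([1] : List Int), v0)).1

-- ===== PORT B =====
def solution_alt (progresses : List Int) (speeds : List Int) : List Int :=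
  -- day = [(100-p)//s + (1 if (100-p)%s else 0) for p, s in zip(progresses, speeds)]
  let day := (progresses.zip speeds).map (fun q =>
      PySem.Int.floordiv (100 - q.1) q.2 +
        if PySem.Int.mod (100 - q.1) q.2 ≠ 0 then 1 else 0)
  let n : Int := (day.length : Int)
  -- boundaries = [i for i in range(n) if all(day[j] < day[i] for j in range(i))]
  let boundaries := (PySem.List.pyRange 0 n 1).filter (fun i =>
      (PySem.List.pyRange 0 i 1).all (fun j =>
        decide (PySem.List.pyGetD day j 0 < PySem.List.pyGetD day i 0)))
  -- return [b - a for a, b in zip(boundaries, boundaries[1:] + [n])]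
  (boundaries.zip (PySem.List.slice boundaries (some 1) none ++ [n])).map (fun q => q.2 - q.1)

-- ===== PRECONDITION & SPEC =====
-- Pre_ excludes exactly the inputs where A raises: empty progresses (IndexError at day[0]),
-- speeds shorter than progresses (IndexError), and a zero speed used by the loop (ZeroDivisionError).
def Pre_solution (progresses : List Int) (speeds : List Int) : Prop :=
  progresses ≠ [] ∧ progresses.length ≤ speeds.length ∧
    ∀ x ∈ speeds.take progresses.length, x ≠ 0
instance (progresses : List Int) (speeds : List Int) : Decidable (Pre_solution progresses speeds) := by
  unfold Pre_solution; infer_instance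
def pvWitness_solution : List Int × List Int := ([30, 55, 93], [5, 10, 1])

def Spec_solution (progresses : List Int) (speeds : List Int) (out : List Int) : Prop := out = solution_alt progresses speeds
instance (progresses : List Int) (speeds : List Int) (out : List Int) : Decidable (Spec_solution progresses speeds out) := by unfold Spec_solution; infer_instance

-- ===== CLAIM (what is proved, stated in full; the proofs are below) =====
def Claim_equal_solution : Prop := ∀ (progresses : List Int) (speeds : List Int), Dom_solution progresses speeds → Pre_solution progresses speeds → Spec_solution progresses speeds (solution progresses speeds)

-- ===== LEMMAS AND PROOFS =====

-- reference list of prefix maxima (proof-side only)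
def accMaxB : Int → List Int → List Int
  | _, [] => []
  | v, x :: xs => max v x :: accMaxB (max v x) xs

-- run lengths of equal values (proof-side only)
def groupGoB : Int → Int → List Int → List Int
  | _, c, [] => [c]
  | k, c, x :: xs => if x = k then groupGoB k (c + 1) xs else c :: groupGoB x 1 xs

-- boundary indices: position i0+t starts a group iff its day exceeds the running max v
def bnds : Int → List Int → Int → List Int
  | _, [], _ => []
  | v, x :: xs, i0 => if v < x then i0 :: bnds x xs (i0 + 1) else bnds v xs (i0 + 1)

-- the common day list both programs compute
def dayZ (progresses : List Int) (speeds : List Int) : List Int :=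
  (progresses.zip speeds).map (fun q =>
    PySem.Int.floordiv (100 - q.1) q.2 +
      if PySem.Int.mod (100 - q.1) q.2 ≠ 0 then 1 else 0)

-- A's branching day entry equals B's floordiv-plus-indicator entry
lemma branch_eq (x s : Int) :
    (if PySem.Int.mod x s = 0 then PySem.Int.floordiv x s else PySem.Int.floordiv x s + 1)
      = PySem.Int.floordiv x s + (if PySem.Int.mod x s ≠ 0 then 1 else 0) := by
  by_cases h : PySem.Int.mod x s = 0 <;> simp [h]

-- A's day list is B's day list
lemma day_eq (p s : List Int) (hlen : p.length ≤ s.length) :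
    solutionDayA p s = dayZ p s := by
  unfold solutionDayA dayZ
  have hfun : (fun (acc : List Int) (i : Int) =>
      if PySem.Int.mod (100 - PySem.List.pyGetD p i 0) (PySem.List.pyGetD s i 0) = 0 then
        acc ++ [PySem.Int.floordiv (100 - PySem.List.pyGetD p i 0) (PySem.List.pyGetD s i 0)]
      else
        acc ++ [PySem.Int.floordiv (100 - PySem.List.pyGetD p i 0) (PySem.List.pyGetD s i 0) + 1])
      = (fun acc i => acc ++ [if PySem.Int.mod (100 - PySem.List.pyGetD p i 0) (PySem.List.pyGetD s i 0) = 0 then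
          PySem.Int.floordiv (100 - PySem.List.pyGetD p i 0) (PySem.List.pyGetD s i 0)
        else PySem.Int.floordiv (100 - PySem.List.pyGetD p i 0) (PySem.List.pyGetD s i 0) + 1]) := by
    funext acc i; split_ifs <;> rfl
  rw [hfun, PySem.List.foldl_append_singleton_eq_map, List.nil_append]
  apply List.ext_getElem
  · simp [PySem.List.length_pyRange_one, List.length_zip, Nat.min_eq_left hlen]
  · intro k hk1 hk2
    rw [List.getElem_map, List.getElem_map, PySem.List.getElem_pyRange_one, zero_add]
    have hkp : k < p.length := by
      simpa [PySem.List.length_pyRange_one] using hk1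
    have hks : k < s.length := lt_of_lt_of_le hkp hlen
    have hkz : k < (p.zip s).length := by simp [List.length_zip, Nat.min_eq_left hlen, hkp]
    have hgp : PySem.List.pyGetD p (k : Int) 0 = p[k] := by
      rw [PySem.List.pyGetD_natCast, List.getD_eq_getElem _ _ hkp]
    have hgs : PySem.List.pyGetD s (k : Int) 0 = s[k]'hks := by
      rw [PySem.List.pyGetD_natCast, List.getD_eq_getElem _ _ hks]
    have hz : (p.zip s)[k]'hkz = (p[k]'hkp, s[k]'hks) := List.getElem_zip ..
    rw [hgp, hgs, hz]
    exact branch_eq _ _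

-- A's answer loop, started on any answer prefix, computes the run lengths of the prefix maxima
lemma loopA_eq_group (rest : List Int) : ∀ (ans : List Int) (c v : Int),
    (rest.foldl (fun st i =>
        if st.2 ≥ i then (st.1.dropLast ++ [st.1.getLast! + 1], st.2)
        else (st.1 ++ [1], i)) ((ans ++ [c] : List Int), v)).1
      = ans ++ groupGoB v c (accMaxB v rest) := by
  induction rest with
  | nil => intro ans c v; simp [accMaxB, groupGoB]
  | cons i rest ih =>
    intro ans c v
    simp only [List.foldl_cons, accMaxB]
    by_cases h : v ≥ i
    · rw [if_pos h]
      have hm : max v i = v := max_eq_left h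
      have h1 : (ans ++ [c]).dropLast = ans := List.dropLast_concat ..
      have h2 : (ans ++ [c]).getLast! = c := by simp
      rw [hm, h1, h2]
      simp only [groupGoB]
      exact ih ans (c + 1) v
    · rw [if_neg h]
      have hm : max v i = i := max_eq_right (le_of_not_ge h)
      have hne : ¬ (i = v) := by omega
      rw [hm]
      simp only [groupGoB, if_neg hne]
      have := ih (ans ++ [c]) 1 i
      simp only [List.append_assoc, List.singleton_append] at this ⊢
      exact this

-- B's boundary filter, generalized over a processed prefix whose maximum is v
lemma filt (ds : List Int) : ∀ (pre : List Int) (v : Int), v ∈ pre → (∀ y ∈ pre, y ≤ v) →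
    ((PySem.List.pyRange (pre.length : Int) ((pre.length : Int) + (ds.length : Int)) 1).filter
      (fun i => (PySem.List.pyRange 0 i 1).all (fun j =>
        decide (PySem.List.pyGetD (pre ++ ds) j 0 < PySem.List.pyGetD (pre ++ ds) i 0))))
      = bnds v ds (pre.length : Int) := by
  induction ds with
  | nil =>
    intro pre v _ _
    simp [bnds, PySem.List.pyRange_one_eq_nil]
  | cons x xs ih =>
    intro pre v hv hmax
    have hL : (pre.length : Int) < (pre.length : Int) + ((x :: xs).length : Int) := by
      simp only [List.length_cons]; push_cast; omega
    rw [PySem.List.pyRange_one_cons hL, List.filter_cons]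
    -- the condition at i = pre.length
    have hgetx : PySem.List.pyGetD (pre ++ x :: xs) (pre.length : Int) 0 = x := by
      rw [PySem.List.pyGetD_natCast]
      simp [List.getD]
    have hcond : ((PySem.List.pyRange 0 ((pre.length : Int)) 1).all (fun j =>
        decide (PySem.List.pyGetD (pre ++ x :: xs) j 0 < PySem.List.pyGetD (pre ++ x :: xs) (pre.length : Int) 0)))
        = decide (v < x) := by
      rw [hgetx]
      by_cases h : v < x
      · rw [decide_eq_true h, List.all_eq_true]
        intro j hj
        rw [PySem.List.mem_pyRange_one] at hj
        obtain ⟨hj0, hjL⟩ := hj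
        obtain ⟨m, rfl⟩ : ∃ m : Nat, j = (m : Int) := ⟨j.toNat, by omega⟩
        have hjn : m < pre.length := by omega
        have hget : PySem.List.pyGetD (pre ++ x :: xs) ((m : Nat) : Int) 0 = pre[m] := by
          rw [PySem.List.pyGetD_natCast]
          simp [List.getD, List.getElem?_append_left, hjn]
        rw [hget, decide_eq_true_eq]
        exact lt_of_le_of_lt (hmax _ (List.getElem_mem _)) h
      · rw [decide_eq_false h]
        obtain ⟨k, hk, hkv⟩ := List.getElem_of_mem hv
        apply List.all_eq_false.mpr
        refine ⟨(k : Int), ?_, ?_⟩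
        · rw [PySem.List.mem_pyRange_one]; omega
        · have : PySem.List.pyGetD (pre ++ x :: xs) (k : Int) 0 = pre[k] := by
            rw [PySem.List.pyGetD_natCast]
            simp [List.getD, List.getElem?_append_left, hk]
          simp [this, hkv]
          omega
    have hshift : (pre.length : Int) + 1 = ((pre ++ [x]).length : Int) := by
      simp
    have happ : pre ++ x :: xs = (pre ++ [x]) ++ xs := by simp
    have hlen2 : (pre.length : Int) + ((x :: xs).length : Int)
        = ((pre ++ [x]).length : Int) + (xs.length : Int) := by
      simp; omega
    by_cases h : v < x
    · rw [hcond, decide_eq_true h]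
      have hx' : x ∈ pre ++ [x] := by simp
      have hmax' : ∀ y ∈ pre ++ [x], y ≤ x := by
        intro y hy
        rcases List.mem_append.mp hy with hy | hy
        · exact le_of_lt (lt_of_le_of_lt (hmax _ hy) h)
        · simp at hy; omega
      have := ih (pre ++ [x]) x hx' hmax'
      rw [happ, hlen2, hshift]
      rw [this]
      simp only [bnds, if_pos h]
      simp
    · rw [hcond, decide_eq_false h]
      simp only [Bool.false_eq_true]
      have hv' : v ∈ pre ++ [x] := List.mem_append_left _ hv
      have hmax' : ∀ y ∈ pre ++ [x], y ≤ v := by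
        intro y hy
        rcases List.mem_append.mp hy with hy | hy
        · exact hmax _ hy
        · simp at hy; omega
      have := ih (pre ++ [x]) v hv' hmax'
      rw [happ, hlen2, hshift, this]
      simp only [bnds, if_neg h]
      simp

-- difference of consecutive boundaries equals the run lengths of the prefix maxima
lemma dif_eq (ds : List Int) : ∀ (v c i0 : Int),
    groupGoB v c (accMaxB v ds)
      = (((i0 - c) :: bnds v ds i0).zip (bnds v ds i0 ++ [i0 + (ds.length : Int)])).map
          (fun q => q.2 - q.1) := by
  induction ds with
  | nil =>
    intro v c i0
    simp [groupGoB, accMaxB, bnds]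
  | cons x xs ih =>
    intro v c i0
    simp only [accMaxB]
    by_cases h : v < x
    · have hm : max v x = x := max_eq_right (le_of_lt h)
      have hne : x ≠ v := by omega
      rw [hm]
      simp only [groupGoB, if_neg hne, bnds, if_pos h]
      have := ih x 1 (i0 + 1)
      simp only [List.zip_cons_cons, List.map_cons, List.cons_append]
      have harith : i0 - (i0 - c) = c := by ring
      rw [harith]
      congr 1
      have h2 : (i0 + 1) - 1 = i0 := by ring
      have h3 : (i0 + 1) + (xs.length : Int) = i0 + ((x :: xs).length : Int) := by
        simp; omega
      rw [h2, h3] at this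
      exact this
    · have hm : max v x = v := max_eq_left (le_of_not_gt h)
      rw [hm]
      simp only [groupGoB, bnds, if_neg h]
      have := ih v (c + 1) (i0 + 1)
      have h2 : (i0 + 1) - (c + 1) = i0 - c := by ring
      have h3 : (i0 + 1) + (xs.length : Int) = i0 + ((x :: xs).length : Int) := by
        simp; omega
      rw [h2, h3] at this
      exact this

-- ===== VERDICT (by name: the statement is the Claim_ definition above) =====
theorem solution_spec : Claim_equal_solution := by
  intro p s _ hpre
  obtain ⟨hne, hlen, _⟩ := hpre
  unfold Spec_solution solution solution_alt
  rw [day_eq p s hlen]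
  cases hday : dayZ p s with
  | nil =>
    exfalso
    have hlz : (p.zip s).length = 0 := by
      have := congrArg List.length hday
      simpa [dayZ] using this
    rw [List.length_zip, Nat.min_eq_left hlen] at hlz
    exact hne (List.eq_nil_of_length_eq_zero hlz)
  | cons d ds =>
    show (ds.foldl _ (([1] : List Int), d)).1 = _
    have hA := loopA_eq_group ds [] 1 d
    simp only [List.nil_append] at hA
    rw [hA]
    -- B side
    have hdz : (p.zip s).map (fun q =>
        PySem.Int.floordiv (100 - q.1) q.2 +
          if PySem.Int.mod (100 - q.1) q.2 ≠ 0 then 1 else 0) = d :: ds := hday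
    simp only [hdz]
    -- boundaries = 0 :: bnds d ds 1
    have hn : ((d :: ds).length : Int) = 1 + (ds.length : Int) := by simp; omega
    have hpos : (0 : Int) < ((d :: ds).length : Int) := by simp
    rw [PySem.List.pyRange_one_cons hpos, List.filter_cons]
    have hcond0 : ((PySem.List.pyRange 0 (0 : Int) 1).all (fun j =>
        decide (PySem.List.pyGetD (d :: ds) j 0 < PySem.List.pyGetD (d :: ds) (0 : Int) 0))) = true := by
      rw [PySem.List.pyRange_one_eq_nil (le_refl 0)]; rfl
    rw [hcond0]
    norm_num
    have hfilt := filt ds [d] d (by simp) (by simp)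
    have hd1 : (([d] : List Int).length : Int) = 1 := by simp
    have hddl : ([d] : List Int) ++ ds = d :: ds := by simp
    rw [hd1, hddl] at hfilt
    have hlen1 : (1 : Int) + (ds.length : Int) = (ds.length : Int) + 1 := by ring
    rw [hlen1] at hfilt
    rw [hfilt]
    -- slice [1:] = drop 1
    have hslice : PySem.List.slice (0 :: bnds d ds 1) (some 1) none = bnds d ds 1 := by
      rw [PySem.List.slice_from]
      · rfl
      · omega
    rw [hslice]
    have := dif_eq ds d 1 1
    have h0 : (1 : Int) - 1 = 0 := by ring
    have h1 : (1 : Int) + (ds.length : Int) = (ds.length : Int) + 1 := by ring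
    rw [h0, h1] at this
    exact this
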